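-- pv_equiv track=rewrite | github.com/GitVladlen/docx-te-parser | parser.py | split_nodes_by_encounters
-- ===== SOURCE A (Python) =====
-- def split_nodes_by_encounters(nodes):
--     # todo: refactor to regex
--     result = []
--     cur_nodes = []
--     for node in nodes:
--         tag, _ = node
--
--         if tag == "ID":
--             if cur_nodes:
--                 result.append(cur_nodes)
--             cur_nodes = []
--
--         cur_nodes.append(node)
--
--     if cur_nodes:
--         result.append(cur_nodes)
--
--     # print "".join(map(lambda (index, nodes): "{}. {}\n\n".format(index, nodes), enumerate(result)))
--     return result
--     pass
-- ===== SOURCE B (Python) =====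
-- def split_nodes_by_encounters(nodes):
--     nodes = list(nodes)
--     id_idxs = [i for i, (tag, _) in enumerate(nodes) if tag == "ID"]
--     result = []
--     prev = 0
--     for idx in id_idxs:
--         if prev < idx:
--             result.append(nodes[prev:idx])
--         prev = idx
--     if prev < len(nodes):
--         result.append(nodes[prev:])
--     return result
-- ===== Notes on version B (the rewrite author's own statement) =====
-- stated objective: alternative
-- what changed: B first collects the indices of 'ID' nodes in one pass, then emits the groups as slices between consecutive boundary indices, instead of A's accumulate-and-flush of a running group list.
import Mathlib
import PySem

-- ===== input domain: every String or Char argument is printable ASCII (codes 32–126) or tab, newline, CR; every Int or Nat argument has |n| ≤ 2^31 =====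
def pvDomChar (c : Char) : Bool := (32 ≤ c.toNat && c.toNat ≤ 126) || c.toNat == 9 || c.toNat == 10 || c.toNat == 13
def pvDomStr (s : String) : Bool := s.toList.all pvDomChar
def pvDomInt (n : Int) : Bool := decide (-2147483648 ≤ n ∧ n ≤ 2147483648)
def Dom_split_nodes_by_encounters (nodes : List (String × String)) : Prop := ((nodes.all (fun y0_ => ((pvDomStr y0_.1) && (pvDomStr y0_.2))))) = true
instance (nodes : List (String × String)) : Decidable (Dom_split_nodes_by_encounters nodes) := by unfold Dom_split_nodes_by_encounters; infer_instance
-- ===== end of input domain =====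

-- B re-groups by collecting the 'ID' boundary indices and slicing between them,
-- instead of A's accumulate-and-flush loop; same cost, different decomposition.

-- ===== PORT A =====
-- loop body of A's for-loop (flush cur_nodes on an "ID" tag, then append the node)
def pvStepA (st : List (List (String × String)) × List (String × String))
    (node : String × String) : List (List (String × String)) × List (String × String) :=
  if node.1 == "ID" then
    ((if st.2 = [] then st.1 else st.1 ++ [st.2]), [node])
  else (st.1, st.2 ++ [node])

def split_nodes_by_encounters (nodes : List (String × String)) : List (List (String × String)) :=
  let st := nodes.foldl pvStepA ([], [])
  if st.2 = [] then st.1 else st.1 ++ [st.2]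

-- ===== PORT B =====
-- [i for i, (tag, _) in enumerate(nodes) if tag == "ID"]
def pvIdxs (nodes : List (String × String)) : List Int :=
  (PySem.List.enumerate nodes).filterMap (fun p => if p.2.1 == "ID" then some p.1 else none)

-- loop body of B's for-loop over the boundary indices (nodes[prev:idx] when nonempty)
def pvStepB (nodes : List (String × String))
    (st : List (List (String × String)) × Int) (idx : Int) :
    List (List (String × String)) × Int :=
  ((if st.2 < idx then st.1 ++ [PySem.List.slice nodes (some st.2) (some idx)] else st.1), idx)

def split_nodes_by_encounters_alt (nodes : List (String × String)) : List (List (String × String)) :=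
  let st := (pvIdxs nodes).foldl (pvStepB nodes) ([], 0)
  if st.2 < (nodes.length : Int) then st.1 ++ [PySem.List.slice nodes (some st.2) none] else st.1

-- ===== PRECONDITION & SPEC =====
def Spec_split_nodes_by_encounters (nodes : List (String × String)) (out : List (List (String × String))) : Prop := out = split_nodes_by_encounters_alt nodes
instance (nodes : List (String × String)) (out : List (List (String × String))) : Decidable (Spec_split_nodes_by_encounters nodes out) := by unfold Spec_split_nodes_by_encounters; infer_instance

-- ===== CLAIM (what is proved, stated in full; the proofs are below) =====
def Claim_equal_split_nodes_by_encounters : Prop := ∀ (nodes : List (String × String)), Dom_split_nodes_by_encounters nodes → Spec_split_nodes_by_encounters nodes (split_nodes_by_encounters nodes)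

-- ===== LEMMAS AND PROOFS =====

-- common recursive characterisation: groups of `rest` given the group `cur` under construction
def pvGroups : List (String × String) → List (String × String) → List (List (String × String))
  | cur, [] => if cur = [] then [] else [cur]
  | cur, n :: rest =>
      if n.1 == "ID" then (if cur = [] then [] else [cur]) ++ pvGroups [n] rest
      else pvGroups (cur ++ [n]) rest

lemma pvA_run (rest : List (String × String)) :
    ∀ (res : List (List (String × String))) (cur : List (String × String)),
      (let st := rest.foldl pvStepA (res, cur)
       if st.2 = [] then st.1 else st.1 ++ [st.2]) = res ++ pvGroups cur rest := by
  induction rest with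
  | nil =>
      intro res cur
      simp only [List.foldl_nil, pvGroups]
      split <;> simp [*]
  | cons n rest ih =>
      intro res cur
      simp only [List.foldl_cons, pvGroups, pvStepA]
      by_cases h : n.1 == "ID"
      · simp only [h, ite_true]
        rw [ih]
        by_cases hc : cur = [] <;> simp [hc]
      · simp only [h]
        simp only [Bool.false_eq_true, if_false]
        rw [ih]

-- index list of `rest` when enumeration starts at s
def pvIdxsFrom (s : Int) (nodes : List (String × String)) : List Int :=
  (PySem.List.enumerate nodes s).filterMap (fun p => if p.2.1 == "ID" then some p.1 else none)

lemma pvIdxs_eq_from (nodes : List (String × String)) : pvIdxs nodes = pvIdxsFrom 0 nodes := rfl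

lemma pvIdxsFrom_cons (s : Int) (n : String × String) (rest : List (String × String)) :
    pvIdxsFrom s (n :: rest)
      = (if n.1 == "ID" then [s] else []) ++ pvIdxsFrom (s + 1) rest := by
  simp only [pvIdxsFrom, PySem.List.enumerate_cons, List.filterMap_cons]
  by_cases h : n.1 == "ID" <;> simp [h]

-- pvFinB: the final «if prev < len(nodes)» step of B, named for use in the run lemma
def pvFinB (nodes : List (String × String)) (st : List (List (String × String)) × Int) :
    List (List (String × String)) :=
  if st.2 < (nodes.length : Int) then st.1 ++ [PySem.List.slice nodes (some st.2) none] else st.1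

lemma pvAlt_eq_finB (nodes : List (String × String)) :
    split_nodes_by_encounters_alt nodes
      = pvFinB nodes ((pvIdxs nodes).foldl (pvStepB nodes) ([], 0)) := rfl

lemma pvB_run (rest : List (String × String)) :
    ∀ (front cur : List (String × String)) (res : List (List (String × String))),
      pvFinB (front ++ cur ++ rest)
        ((pvIdxsFrom ((front.length + cur.length : Nat) : Int) rest).foldl
          (pvStepB (front ++ cur ++ rest)) (res, (front.length : Int)))
      = res ++ pvGroups cur rest := by
  induction rest with
  | nil =>
      intro front cur res
      simp only [pvIdxsFrom, PySem.List.enumerate_nil, List.filterMap_nil, List.foldl_nil,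
        pvGroups, List.append_nil, pvFinB]
      rw [PySem.List.slice_from_natCast]
      by_cases hc : cur = []
      · subst hc; simp
      · have hpos : 0 < cur.length := List.length_pos_iff.mpr hc
        have hlt : (front.length : Int) < ((front ++ cur).length : Int) := by
          simp only [List.length_append]; push_cast; omega
        rw [if_pos hlt]
        simp [hc]
  | cons n rest ih =>
      intro front cur res
      rw [pvIdxsFrom_cons]
      by_cases h : n.1 == "ID"
      · simp only [h, ite_true, List.singleton_append, List.foldl_cons, pvStepB]
        have e1 : front ++ cur ++ (n :: rest) = (front ++ cur) ++ [n] ++ rest := by simp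
        have e2 : ((front.length + cur.length : Nat) : Int) = ((front ++ cur).length : Int) := by
          simp
        have e3 : ((front ++ cur).length : Int) + 1
            = (((front ++ cur).length + ([n] : List (String × String)).length : Nat) : Int) := by
          push_cast; simp
        rw [e1, e2, e3, ih]
        have hC : ((front.length : Int) < ((front ++ cur).length : Int)) ↔ cur ≠ [] := by
          simp only [List.length_append]; push_cast
          constructor
          · intro hlt hc; subst hc; simp at hlt
          · intro hc
            have hpos : 0 < cur.length := List.length_pos_iff.mpr hc
            omega
        have hslice : PySem.List.slice ((front ++ cur) ++ [n] ++ rest)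
            (some (front.length : Int)) (some ((front ++ cur).length : Int)) = cur := by
          rw [PySem.List.slice_natCast]
          have : (front ++ cur) ++ [n] ++ rest = front ++ (cur ++ ([n] ++ rest)) := by simp
          rw [this, List.drop_left]
          have hl : (front ++ cur).length - front.length = cur.length := by
            simp [List.length_append]
          rw [hl]
          simp
        rw [hslice]
        simp only [pvGroups, h, ite_true]
        by_cases hc : cur = []
        · rw [if_neg (by simpa [hC] using hc)]
          simp [hc]
        · rw [if_pos (hC.mpr hc)]
          simp [hc]
      · simp only [h, Bool.false_eq_true, if_false, List.nil_append]
        have key := ih front (cur ++ [n]) res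
        have harr : front ++ (cur ++ [n]) ++ rest = front ++ cur ++ (n :: rest) := by
          simp
        have hlen : ((front.length + (cur ++ [n]).length : Nat) : Int)
            = ((front.length + cur.length : Nat) : Int) + 1 := by
          simp only [List.length_append, List.length_cons, List.length_nil]; push_cast; ring
        rw [harr, hlen] at key
        simpa [pvGroups, h] using key

theorem pvB_eq (nodes : List (String × String)) :
    split_nodes_by_encounters_alt nodes = pvGroups [] nodes := by
  rw [pvAlt_eq_finB, pvIdxs_eq_from]
  simpa using pvB_run nodes [] [] []

theorem pvA_eq (nodes : List (String × String)) :
    split_nodes_by_encounters nodes = pvGroups [] nodes := by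
  have := pvA_run nodes [] []
  simpa [split_nodes_by_encounters] using this

-- ===== VERDICT (by name: the statement is the Claim_ definition above) =====
theorem split_nodes_by_encounters_spec : Claim_equal_split_nodes_by_encounters := by
  intro nodes _
  unfold Spec_split_nodes_by_encounters
  rw [pvA_eq, pvB_eq]
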